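/- GENERATED by mk_final_copies.py from the proof of the farm's unit `vorbis_decode_packet_rest.12` (farm:vorbis_decode_packet_rest.12.1: Proof.lean) as the
   re-elaboration sweep compiled it — do not edit. -/
/-
  Unit `vorbis_decode_packet_rest.12` (0x1118de–0x111937, stb_vorbis_fixed.c:3401–3402): the inverse MDCT per channel,
      for (i = 0; i < f->channels; ++i) inverse_mdct(f->channel_buffers[i], n, f, m->blockflag);
  from the assertion `At12` at `cut36` to the assertion `At13` at `cut39`.

  Three walks: `entry_to_head` (`cut36` → the loop head `loop12`, 5 instructions), `mdct_round` (the head → the exit `cut39`, or once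
  round the loop: three check sites and the call of inverse_mdct), and the induction `mdct_loop` on `16 − i`. The loop invariant `Head`
  and everything that does not walk (how STABLE is carried over the call) are in Lemmas.lean.
-/
import Asan.CheckWalk
import Vorbis.Spec.Units.vorbis_decode_packet_rest_12
import Vorbis.Spec.Worked.vorbis_decode_packet_rest_12_Lemmas

open X86 X86.User Asan Vorbis Vorbis.Spec Vorbis.Spec.vorbis_decode_packet_rest

set_option maxRecDepth 4000
set_option maxHeartbeats 4000000

namespace Vorbis.Spec.vorbis_decode_packet_rest_12

/-- `cut36` (0x1118de) → the loop head `loop12` (0x11192b): `i = 0`, `r13d = n`, `rbp = f`, `r14 = m` re-loaded from their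
spill slots; the loop invariant holds for `i = 0`. -/
theorem entry_to_head {Lay : Layout} (hLay : Lay.hi = 0x1000000) {μ : Microarch} (hμ : UserX.MicroOK μ) {u₀ : State}
    (hcode : HasCodeNat Lay u₀ Vorbis.L.vorbis_decode_packet_rest.entry Vorbis.Code.code_vorbis_decode_packet_rest.nat
      Vorbis.L.vorbis_decode_packet_rest.size)
    (others : List Obj) (frames : List (Nat × FrameLayout)) (len : Nat) (Ar : Arena) (stored room : Int)
    (mode : Nat) (ysz : Nat → Nat) (u : State) (ret : Word) (v : State)
    (hat : At12 u₀ others frames len Ar stored room mode ysz u ret v) :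
    ReachVia Lay μ Vorbis.WayInv v (fun w => Head u₀ others frames len Ar stored room mode ysz u ret 0 w) := by
  -- 1. the entry state's facts
  have he := hat.entry
  v_entry he
  -- 2. the present state under the walker's names (rsp is not written by the segment: not a `w_` name, which the walker clears)
  have w_rip := hat.rip
  have h_rsp : v.reg .rsp = u.reg .rsp - 3000 := hat.rsp
  have w_eq : Mem.EqOn Vorbis.L.textLo Vorbis.L.textHi u₀.mem v.mem := hat.code
  have hdf : v.flags .df = false := (show abiInv _ from hat.abi).1
  have hmx : v.mxcsr &&& 0x1F80 = 0x1F80 := (show abiInv _ from hat.abi).2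
  have hsse := Vorbis.sseOK_of_abiInv hat.abi
  -- 3. the three spill slots the segment loads, at the addresses as the walker normalises them
  have e50 : u.reg .rsp - 3000 + 0x50 = u.reg .rsp - 2920 := by u_omega
  have e40 : u.reg .rsp - 3000 + 0x40 = u.reg .rsp - 2936 := by u_omega
  have e70 : u.reg .rsp - 3000 + 0x70 = u.reg .rsp - 2888 := by u_omega
  have l50 : v.mem.readLE (u.reg .rsp - 2920) 4 = nOf v.mem (fOf u) (mOf u) := by
    rw [← e50]
    exact hat.slot_n
  have l40 : v.mem.readLE (u.reg .rsp - 2936) 8 = fOf u := by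
    rw [← e40]
    exact hat.slot_f
  have l70 : v.mem.readLE (u.reg .rsp - 2888) 8 = mOf u := by
    rw [← e70]
    exact hat.slot_m
  -- 4. the walk
  u_walk hcode [hμ.vendor] until [Vorbis.L.vorbis_decode_packet_rest.loop12] span [Vorbis.L.textLo, Vorbis.L.textHi] side (v_side)
  -- 5. 0x11192b, the loop head: the invariant for `i = 0`
  refine ReachVia.done ?_
  have hab : abiInv s_1118f2 := by v_inv
  have hrsp' : s_1118f2.reg .rsp = spOf u := by
    rw [w_kept .rsp rfl]
    exact hat.rsp
  obtain ⟨hst', hsb'⟩ := stable_congr hat.toStable hat.slot_sb0 w_mem hrsp' hab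
  obtain ⟨k, hk⟩ := n_ld hat.toFrame
  have hn13 := hk.isBlocksize.facts
  refine ⟨hst', w_rip, hsb', ?_, ?_, ?_, ?_, ?_⟩
  · rw [w_rbx]
    rfl
  · rw [w_r13, w_mem, Vorbis.toNat_ofBV32, toNat_ofNat32 _ (by omega)]
  · exact w_rbp
  · exact w_r14
  · have := (chan_le hst'.toFrame).1
    omega

/-- **One round from the loop head** `loop12` (0x11192b): the loop test (`load4 f+4`), then either the exit to `cut39` with `At13`,
or the body — `load1 m+0`, `load8 f+0x368+8i`, the call of inverse_mdct (0x111923), `++i` — back to the head with the invariant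
for `i + 1`. -/
theorem mdct_round {Lay : Layout} (hLay : Lay.hi = 0x1000000) {μ : Microarch} (hμ : UserX.MicroOK μ) {u₀ : State}
    (hcode : HasCodeNat Lay u₀ Vorbis.L.vorbis_decode_packet_rest.entry Vorbis.Code.code_vorbis_decode_packet_rest.nat
      Vorbis.L.vorbis_decode_packet_rest.size)
    (h1 : Asan.SmallCheck Lay μ Vorbis.WayInv (Vorbis.CodeOK u₀) [.rax, .rdx] 1 Vorbis.L.__asan_load1_noabort.entry)
    (h8 : Asan.SmallCheck Lay μ Vorbis.WayInv (Vorbis.CodeOK u₀) [.rax, .rcx, .rdx] 8 Vorbis.L.__asan_load8_noabort.entry)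
    (h4 : Asan.SmallCheck Lay μ Vorbis.WayInv (Vorbis.CodeOK u₀) [.rax, .rcx, .rdx] 4 Vorbis.L.__asan_load4_noabort.entry)
    (others : List Obj) (frames : List (Nat × FrameLayout)) (len : Nat) (Ar : Arena) (stored room : Int)
    (mode : Nat) (ysz : Nat → Nat) (u : State) (ret : Word) (i : Nat) (v : State)
    (h_md : ∀ (k c : Nat), Calls Lay μ Vorbis.WayInv (Vorbis.conv u₀) Vorbis.L.inverse_mdct.entry
      (Vorbis.Spec.inverse_mdct.spec others (framesIn frames u) len Ar stored room ysz k c))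
    (hat : Head u₀ others frames len Ar stored room mode ysz u ret i v) :
    ReachVia Lay μ Vorbis.WayInv v (fun w => At13 u₀ others frames len Ar stored room mode ysz u ret w ∨
      Head u₀ others frames len Ar stored room mode ysz u ret (i + 1) w) := by
  have hst := hat.stable
  have he := hst.entry
  v_entry he
  -- the present state under the walker's names
  have w_rip := hat.rip
  have h_rsp : v.reg .rsp = u.reg .rsp - 3000 := hst.rsp
  have h_rbx := hat.rbx
  have h_rbp := hat.rbp
  have h_r14 := hat.r14
  have w_eq : Mem.EqOn Vorbis.L.textLo Vorbis.L.textHi u₀.mem v.mem := hst.code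
  have hdf : v.flags .df = false := (show abiInv _ from hst.abi).1
  have hmx : v.mxcsr &&& 0x1F80 = 0x1F80 := (show abiInv _ from hst.abi).2
  have hsse := Vorbis.sseOK_of_abiInv hst.abi
  -- where `*f` and the mode record are; `i ≤ C ≤ 16`; `n < 2 ^ 32`
  have hobr := hst.inv.fb.vorbis.bits.OBR
  simp only [voff] at hobr
  have hfhi : (u.reg .rdi).toNat + 1808 ≤ 0xC00000 := hobr.2
  obtain ⟨hm, hmd⟩ := modeRec_eq hst.toFrame
  have hi16 : i ≤ 16 := by
    have := hat.i_le
    have := (chan_le hst.toFrame).2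
    omega
  obtain ⟨k, hk⟩ := n_ld hst.toFrame
  have hr13lt : (v.reg .r13).toNat < 2 ^ 32 := by
    have := hk.isBlocksize.facts
    rw [hat.r13]
    omega
  -- the callee's contract, for the `ld` of `n` and the channel `i`
  have hmdct := h_md k i
  u_walk hcode [hμ.vendor] until [Vorbis.L.vorbis_decode_packet_rest.loop12, Vorbis.L.vorbis_decode_packet_rest.cut39] span [Vorbis.L.textLo, Vorbis.L.textHi] side (v_side)
  · -- 0x11192f, load4 f+4 (`f->channels`, line 3401): a field of `*f`
    have hun : ShadowUntouched v.mem s_11192f.mem := by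
      rw [w_mem]
      exact push_untouched _ _ _ (by u_omega)
    exact Vorbis.Spec.check_site hst.shadow hun (site_objField hst.toFrame 4 4 (by omega) (by omega)) (by
      show (u.reg .rdi + 4).toNat = (u.reg .rdi).toNat + 4
      u_omega)
  · -- 0x1118f7, load1 m+0 (`m->blockflag`, line 3402): the mode record lies in `*f`
    have hun : ShadowUntouched v.mem s_1118f7.mem := by
      rw [w_mem]
      exact push_untouched _ _ _ (by u_omega)
    exact Vorbis.Spec.check_site hst.shadow hun (site_objField hst.toFrame (484 + 6 * mode) 1 (by omega) (by omega)) (by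
      show mOf u = _
      omega)
  · -- 0x11190f, load8 f+0x368+8i (`f->channel_buffers[i]`, line 3402): `i < C ≤ 16`
    have hi := (branch_iff hst.toFrame _ hi16).mp hbr_111937
    have hi15 : i < 16 := by
      have := (chan_le hst.toFrame).2
      omega
    have hun : ShadowUntouched v.mem s_11190f.mem := by
      rw [w_mem]
      exact push_untouched _ _ _ (by u_omega)
    rw [sext_small i hi15]
    exact Vorbis.Spec.check_site hst.shadow hun (site_objField hst.toFrame (872 + 8 * i) 8 (by omega) (by omega)) (by
      show (u.reg .rdi + UInt64.ofNat i * 8 + 872).toNat = (u.reg .rdi).toNat + (872 + 8 * i)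
      u_omega)
  · -- the ABI's invariant at inverse_mdct's entry
    v_inv
  · -- 0x111923: inverse_mdct's precondition
    have hi := (branch_iff hst.toFrame _ hi16).mp hbr_111937
    have hi15 : i < 16 := by
      have := (chan_le hst.toFrame).2
      omega
    obtain ⟨hbv, hb256⟩ := blockflag_val hst.toFrame 1120508
    show inverse_mdct.Pre others (framesIn frames u) len Ar stored room ysz k i s_111923
    refine call_pre hat w_mem ?_ w_rdx ?_ ?_ ?_ hi hk
    · rw [w_rsp]
      u_omega
    · rw [w_rdi]
      exact rdi_val hst.toFrame _ hi15
    · rw [w_rsi]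
      exact (rsi_val _ hr13lt).trans hat.r13
    · rw [w_rcx, hbv]
      exact rcx_val _ hb256
  · -- 0x111928, the state inverse_mdct returned: its precondition again (what STABLE is carried by), then `add ebx, 1`
    have hi := (branch_iff hst.toFrame _ hi16).mp hbr_111937
    have hi15 : i < 16 := by
      have := (chan_le hst.toFrame).2
      omega
    obtain ⟨hbv, hb256⟩ := blockflag_val hst.toFrame 1120508
    have hsr : (s_111923.reg .rsp).toNat = (u.reg .rsp).toNat - 3008 := by
      rw [w_rsp_111923]
      u_omega
    have hpre : inverse_mdct.Pre others (framesIn frames u) len Ar stored room ysz k i s_111923 := by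
      refine call_pre hat w_mem_111923 hsr w_rdx_111923 ?_ ?_ ?_ hi hk
      · rw [w_rdi_111923]
        exact rdi_val hst.toFrame _ hi15
      · rw [w_rsi_111923]
        exact (rsi_val _ hr13lt).trans hat.r13
      · rw [w_rcx_111923, hbv]
        exact rcx_val _ hb256
    have hsf : inverse_mdct.f s_111923 = fOf u := by
      rw [inverse_mdct.f_def, w_rdx_111923]
    have w_eq := Vorbis.conv_code_eqOn w_code
    have w_df := (show X86.User.abiInv _ from w_inv).1
    have w_mx := (show X86.User.abiInv _ from w_inv).2
    have w_sse := Vorbis.sseOK_of_abiInv w_inv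
    clear w_r12 w_r15 w_r12_111923 w_r15_111923
    u_walk hcode [hμ.vendor] until [Vorbis.L.vorbis_decode_packet_rest.loop12, Vorbis.L.vorbis_decode_packet_rest.cut39] span [Vorbis.L.textLo, Vorbis.L.textHi] side (v_side)
    -- 0x11192b, the loop head again: the invariant for `i + 1`
    refine ReachVia.done (Or.inr ?_)
    have hab : abiInv s_111928 := by
      refine Vorbis.abiInv_of ?_ ?_
      · rw [w_flags]
        simp only [X86.User.df_setStatus]
        exact w_df
      · rw [w_mxcsr]
        exact w_mx
    obtain ⟨⟨hst', hsb'⟩, hK⟩ := stable_step hst hat.slot_sb0 w_mem_111923 hsr hsf hpre w_same w_post w_mem w_rsp w_eq hab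
    refine ⟨hst', w_rip, hsb', ?_, ?_, ?_, ?_, ?_⟩
    · rw [w_rbx]
      exact inc_small i hi15
    · rw [w_kept .r13 rfl, hat.r13]
      exact (nOf_step hst.toFrame hK).symm
    · rw [w_kept .rbp rfl]
      exact hat.rbp
    · rw [w_kept .r14 rfl]
      exact hat.r14
    · rw [channels_kept hK]
      omega
  · -- 0x111939 = `cut39`, the exit (`jg` not taken): `At13`
    refine ReachVia.done (Or.inl ?_)
    have hab : abiInv s_111937 := by v_inv
    obtain ⟨hst', hsb'⟩ := stable_push hst hat.slot_sb0 w_mem w_rsp w_eq hab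
    exact ⟨hst', w_rip, hsb'⟩

/-- **The loop** (line 3401), by induction on a bound `k` of the rounds left (`16 < i + k`; `i ≤ C ≤ 16`: HD1): from the invariant
at the head to `At13` at the exit `cut39`. -/
theorem mdct_loop {Lay : Layout} (hLay : Lay.hi = 0x1000000) {μ : Microarch} (hμ : UserX.MicroOK μ) {u₀ : State}
    (hcode : HasCodeNat Lay u₀ Vorbis.L.vorbis_decode_packet_rest.entry Vorbis.Code.code_vorbis_decode_packet_rest.nat
      Vorbis.L.vorbis_decode_packet_rest.size)
    (h1 : Asan.SmallCheck Lay μ Vorbis.WayInv (Vorbis.CodeOK u₀) [.rax, .rdx] 1 Vorbis.L.__asan_load1_noabort.entry)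
    (h8 : Asan.SmallCheck Lay μ Vorbis.WayInv (Vorbis.CodeOK u₀) [.rax, .rcx, .rdx] 8 Vorbis.L.__asan_load8_noabort.entry)
    (h4 : Asan.SmallCheck Lay μ Vorbis.WayInv (Vorbis.CodeOK u₀) [.rax, .rcx, .rdx] 4 Vorbis.L.__asan_load4_noabort.entry)
    (others : List Obj) (frames : List (Nat × FrameLayout)) (len : Nat) (Ar : Arena) (stored room : Int)
    (mode : Nat) (ysz : Nat → Nat) (u : State) (ret : Word)
    (h_md : ∀ (k c : Nat), Calls Lay μ Vorbis.WayInv (Vorbis.conv u₀) Vorbis.L.inverse_mdct.entry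
      (Vorbis.Spec.inverse_mdct.spec others (framesIn frames u) len Ar stored room ysz k c))
    (k : Nat) : ∀ (i : Nat) (v : State), 16 < i + k →
      Head u₀ others frames len Ar stored room mode ysz u ret i v →
      ReachVia Lay μ Vorbis.WayInv v (fun w => At13 u₀ others frames len Ar stored room mode ysz u ret w) := by
  induction k with
  | zero =>
    -- no round left: `i > 16` contradicts `i ≤ C ≤ 16`
    intro i v hik hat
    exfalso
    have h1 := hat.i_le
    have h2 := (chan_le hat.stable.toFrame).2
    omega
  | succ k ih =>
    intro i v hik hat
    refine (mdct_round hLay hμ hcode h1 h8 h4 others frames len Ar stored room mode ysz u ret i v h_md hat).trans ?_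
    intro w hw
    rcases hw with h13 | hh
    · exact ReachVia.done h13
    · exact ih (i + 1) w (by omega) hh

end Vorbis.Spec.vorbis_decode_packet_rest_12

/-- Segment 12 of `vorbis_decode_packet_rest` (`cut36` … `cut39`, lines 3401–3402): the inverse MDCT of every channel. -/
theorem Vorbis.Spec.Worked.vorbis_decode_packet_rest_12_ok : Vorbis.Spec.vorbis_decode_packet_rest_12.Statement := by
  unfold Vorbis.Spec.vorbis_decode_packet_rest_12.Statement
  intro Lay hLay μ hμ u₀ hcode h1 h8 h_md h4
  intro others frames len Ar stored room mode ysz u ret v hat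
  -- `cut36` → the loop head, then the loop
  refine (Vorbis.Spec.vorbis_decode_packet_rest_12.entry_to_head hLay hμ hcode others frames len Ar stored room mode ysz
    u ret v hat).trans ?_
  intro w hw
  exact Vorbis.Spec.vorbis_decode_packet_rest_12.mdct_loop hLay hμ hcode h1 h8 h4 others frames len Ar stored room mode ysz u ret
    (fun k c => h_md others (framesIn frames u) len Ar stored room ysz k c) 17 0 w (by omega) hw
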